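-- pv_equiv track=rewrite | github.com/patrick-g-zhang/cFrontEnd | src/create_label_state.py | pos_phone_in_syl
-- ===== SOURCE A (Python) =====
-- def pos_phone_in_syl(phone_index, syl_map):
--     syl_index = syl_map[phone_index]
--     syl_index_list = []
--     for key, value in syl_map.items():
--         if value == syl_index:
--             syl_index_list.append(key)
--     syl_len = len(syl_index_list)
--     fw_pos = syl_index_list.index(phone_index) + 1
--     bw_pos = syl_len - fw_pos + 1
--     return fw_pos, bw_pos, syl_index, syl_len
-- ===== SOURCE B (Python) =====
-- def pos_phone_in_syl(phone_index, syl_map):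
--     syl_index = syl_map[phone_index]
--     keys = list(syl_map)
--     values = list(syl_map.values())
--     pos = keys.index(phone_index)
--     fw_pos = values[:pos + 1].count(syl_index)
--     bw_pos = values[pos:].count(syl_index)
--     return fw_pos, bw_pos, syl_index, fw_pos + bw_pos - 1
-- ===== Notes on version B (the rewrite author's own statement) =====
-- stated objective: alternative
-- what changed: Instead of filtering matching keys into a list and re-scanning it with list.index, B locates the phone's position in the key order once and derives fw/bw positions by counting the syllable value in the two slices of the values list around that position (syl_len as fw+bw-1), with no conditional filtering loop at all.
import Mathlib
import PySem

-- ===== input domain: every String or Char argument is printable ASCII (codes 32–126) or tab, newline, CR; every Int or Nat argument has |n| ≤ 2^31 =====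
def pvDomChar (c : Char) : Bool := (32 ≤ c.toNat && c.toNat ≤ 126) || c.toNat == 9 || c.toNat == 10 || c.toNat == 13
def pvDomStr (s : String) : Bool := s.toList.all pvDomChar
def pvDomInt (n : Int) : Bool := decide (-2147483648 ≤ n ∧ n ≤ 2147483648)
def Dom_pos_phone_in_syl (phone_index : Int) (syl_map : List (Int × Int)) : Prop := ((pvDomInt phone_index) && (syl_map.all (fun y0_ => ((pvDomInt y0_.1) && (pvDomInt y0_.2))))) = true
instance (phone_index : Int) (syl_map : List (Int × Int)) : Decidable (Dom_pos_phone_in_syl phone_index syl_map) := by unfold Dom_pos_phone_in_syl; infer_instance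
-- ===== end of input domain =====

-- B replaces A's filter-then-index pass by locating the phone's position in the key order
-- and counting the syllable value in the values-list slices around it (alternative, same O(n)).

-- ===== PORT A =====
-- Literal port of A; dict semantics via PySem.Dict (syl_map arrives as an association list).
-- Where Python raises KeyError (phone_index not a key) the port returns (0,0,0,0); excluded by Pre_.
def pos_phone_in_syl (phone_index : Int) (syl_map : List (Int × Int)) : Int × Int × Int × Int :=
  let d := PySem.Dict.ofList syl_map
  match d.get? phone_index with
  | none => (0, 0, 0, 0)
  | some syl_index =>
    let syl_index_list := d.items.foldl
      (fun acc kv => if kv.2 == syl_index then acc ++ [kv.1] else acc) ([] : List Int)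
    let syl_len : Int := syl_index_list.length
    let fw_pos : Int := (((PySem.List.index? syl_index_list phone_index).getD 0 : Nat) : Int) + 1
    let bw_pos : Int := syl_len - fw_pos + 1
    (fw_pos, bw_pos, syl_index, syl_len)

-- ===== PORT B =====
-- Port of Source B: keys = list(syl_map), values = list(syl_map.values()), pos = keys.index(phone_index),
-- then count syl_index in values[:pos+1] and values[pos:]. The inner 'none' branch (ValueError of
-- keys.index) is unreachable: get? returned some, so phone_index ∈ keys.
def pos_phone_in_syl_alt (phone_index : Int) (syl_map : List (Int × Int)) : Int × Int × Int × Int :=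
  let d := PySem.Dict.ofList syl_map
  match d.get? phone_index with
  | none => (0, 0, 0, 0)
  | some syl_index =>
    let keys := d.keys
    let values := d.values
    match PySem.List.index? keys phone_index with
    | none => (0, 0, 0, 0)
    | some pos =>
      let fw_pos : Int := (PySem.List.count (PySem.List.slice values none (some ((pos : Int) + 1))) syl_index : Nat)
      let bw_pos : Int := (PySem.List.count (PySem.List.slice values (some (pos : Int)) none) syl_index : Nat)
      (fw_pos, bw_pos, syl_index, fw_pos + bw_pos - 1)

-- ===== PRECONDITION & SPEC =====
-- Pre_ excludes exactly the inputs where Python A raises KeyError: phone_index not a key of the dict.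
def Pre_pos_phone_in_syl (phone_index : Int) (syl_map : List (Int × Int)) : Prop :=
  phone_index ∈ syl_map.map Prod.fst
instance (phone_index : Int) (syl_map : List (Int × Int)) : Decidable (Pre_pos_phone_in_syl phone_index syl_map) := by unfold Pre_pos_phone_in_syl; infer_instance
def pvWitness_pos_phone_in_syl : Int × (List (Int × Int)) := (2, [(1, 0), (2, 0), (3, 1)])
def Spec_pos_phone_in_syl (phone_index : Int) (syl_map : List (Int × Int)) (out : Int × Int × Int × Int) : Prop := out = pos_phone_in_syl_alt phone_index syl_map
instance (phone_index : Int) (syl_map : List (Int × Int)) (out : Int × Int × Int × Int) : Decidable (Spec_pos_phone_in_syl phone_index syl_map out) := by unfold Spec_pos_phone_in_syl; infer_instance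

-- ===== CLAIM (what is proved, stated in full; the proofs are below) =====
def Claim_equal_pos_phone_in_syl : Prop := ∀ (phone_index : Int) (syl_map : List (Int × Int)), Dom_pos_phone_in_syl phone_index syl_map → Pre_pos_phone_in_syl phone_index syl_map → Spec_pos_phone_in_syl phone_index syl_map (pos_phone_in_syl phone_index syl_map)

-- ===== LEMMAS AND PROOFS =====

-- ===== VERDICT (by name: the statement is the Claim_ definition above) =====
theorem pos_phone_in_syl_spec : Claim_equal_pos_phone_in_syl := by
  intro pi m _ hpre
  unfold Spec_pos_phone_in_syl pos_phone_in_syl pos_phone_in_syl_alt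
  cases hget : (PySem.Dict.ofList m).get? pi with
  | none =>
    exfalso
    have hmemk : pi ∈ (PySem.Dict.ofList m).keys := by
      have he : PySem.Dict.ofList m
          = m.foldl (fun d (x : Int × Int) => d.insert x.1 x.2) PySem.Dict.empty := rfl
      rcases List.mem_map.1 hpre with ⟨q, hq, hq1⟩
      rw [he, PySem.Dict.keys_foldl_insert_key]
      refine (PySem.Set.mem_update _ _ _).2 (Or.inr ?_)
      exact List.mem_map.2 ⟨q, hq, hq1⟩
    exact ((PySem.Dict.get?_eq_none_iff_not_mem_keys _ _).1 hget) hmemk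
  | some si =>
    have hnd : ((PySem.Dict.ofList m).items.map Prod.fst).Nodup := by
      have := PySem.Dict.nodup_keys_ofList m
      simpa [PySem.Dict.keys] using this
    have hit : (pi, si) ∈ (PySem.Dict.ofList m).items :=
      PySem.Dict.mem_items_of_get?_eq_some _ hget
    obtain ⟨s, t, hsplit⟩ := List.append_of_mem hit
    have hmapsplit : (PySem.Dict.ofList m).items.map Prod.fst
        = s.map Prod.fst ++ pi :: t.map Prod.fst := by simp [hsplit]
    have hpis : pi ∉ s.map Prod.fst := by
      rw [hmapsplit] at hnd
      have hd := (List.nodup_append.1 hnd).2.2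
      intro hmem
      exact hd pi hmem pi (List.mem_cons_self ..) rfl
    have hA : ((PySem.Dict.ofList m).items.foldl
        (fun acc kv => if kv.2 == si then acc ++ [kv.1] else acc) ([] : List Int))
        = (s.filter (fun kv => kv.2 == si)).map Prod.fst
          ++ pi :: (t.filter (fun kv => kv.2 == si)).map Prod.fst := by
      rw [PySem.List.foldl_append_if, hsplit]
      simp [List.filter_append]
    have hpifs : pi ∉ (s.filter (fun kv => kv.2 == si)).map Prod.fst := by
      intro hmem
      rcases List.mem_map.1 hmem with ⟨q, hq, hq1⟩
      exact hpis (List.mem_map.2 ⟨q, List.mem_of_mem_filter hq, hq1⟩)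
    have hidxA : PySem.List.index?
        ((s.filter (fun kv => kv.2 == si)).map Prod.fst
          ++ pi :: (t.filter (fun kv => kv.2 == si)).map Prod.fst) pi
        = some ((s.filter (fun kv => kv.2 == si)).map Prod.fst).length :=
      (PySem.List.index?_eq_some_iff _ _ _).2 ⟨_, _, rfl, rfl, hpifs⟩
    have hkeys : (PySem.Dict.ofList m).keys = s.map Prod.fst ++ pi :: t.map Prod.fst := by
      simp [PySem.Dict.keys, hsplit]
    have hidxB : PySem.List.index? ((PySem.Dict.ofList m).keys) pi
        = some (s.map Prod.fst).length := by
      rw [hkeys]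
      exact (PySem.List.index?_eq_some_iff _ _ _).2 ⟨_, _, rfl, rfl, hpis⟩
    have hvals : (PySem.Dict.ofList m).values = s.map Prod.snd ++ si :: t.map Prod.snd := by
      simp [PySem.Dict.values, hsplit]
    have htake : (s.map Prod.snd ++ si :: t.map Prod.snd).take (s.length + 1)
        = s.map Prod.snd ++ [si] := by
      rw [List.take_append]
      simp
    have hdrop : (s.map Prod.snd ++ si :: t.map Prod.snd).drop s.length
        = si :: t.map Prod.snd := by
      simp
    have hcount : List.count si (s.map Prod.snd) = s.countP (fun kv => kv.2 == si) := by
      rw [List.count_eq_countP, List.countP_map]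
      rfl
    have hcountT : List.count si (t.map Prod.snd) = t.countP (fun kv => kv.2 == si) := by
      rw [List.count_eq_countP, List.countP_map]
      rfl
    have hsliceTo : PySem.List.slice (s.map Prod.snd ++ si :: t.map Prod.snd) none
        (some (((s.map Prod.fst).length : Int) + 1)) = s.map Prod.snd ++ [si] := by
      have h1 : (((s.map Prod.fst).length : Int) + 1) = ((s.length + 1 : Nat) : Int) := by
        push_cast; simp
      rw [h1, PySem.List.slice_to_natCast, htake]
    have hsliceFrom : PySem.List.slice (s.map Prod.snd ++ si :: t.map Prod.snd)
        (some (((s.map Prod.fst).length : Int))) none = si :: t.map Prod.snd := by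
      have h1 : (((s.map Prod.fst).length : Int)) = ((s.length : Nat) : Int) := by
        simp
      rw [h1, PySem.List.slice_from_natCast, hdrop]
    simp only [hget, hA, hidxA, hidxB, hvals, hsliceTo, hsliceFrom, PySem.List.count_eq]
    simp [hcount, hcountT, List.countP_eq_length_filter]
    omega
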